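-- pv_equiv track=rewrite | github.com/dhilanpatel26/singing_boxes | simulations/simulation.py | num_unobstructed
-- ===== SOURCE A (Python) =====
-- def num_unobstructed(transmissions, num_heard):
--     for i in range(len(transmissions)):
--         device_transmissions = transmissions[i]
--         for start_time, end_time in device_transmissions:
--             overlap = False
--             # make sure transmission doesn't overlap with any other transmissions
--             for j in range(len(transmissions)):
--                 if i != j:
--                     for other_start, other_end in transmissions[j]:
--                         if other_start < end_time and other_end > start_time:
--                             overlap = True
--                             break
--             if not overlap:
--                 num_heard[i] += 1
--     return num_heard
-- ===== SOURCE B (Python) =====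
-- # B: sort all transmissions once, then answer each "is this transmission overlapped by
-- # another device?" query with a binary search plus a prefix top-two-ends (from distinct
-- # devices) table: O(K log K) instead of A's O(K^2) all-pairs scan.
-- # Note: A mutates num_heard in place; B builds a fresh list (return value is identical).
--
-- def _bisect_left(a, x):
--     # standard binary search (CPython's bisect_left algorithm)
--     lo, hi = 0, len(a)
--     while lo < hi:
--         mid = (lo + hi) // 2
--         if a[mid] < x:
--             lo = mid + 1
--         else:
--             hi = mid
--     return lo
--
-- def num_unobstructed(transmissions, num_heard):
--     flat = []
--     for i, ts in enumerate(transmissions):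
--         for s, e in ts:
--             flat.append((s, e, i))
--     flat = sorted(flat, key=lambda u: u[0])
--     starts = [u[0] for u in flat]
--     # prefix[k] = (b1, d1, b2) over flat[:k]: b1 = max end, d1 = a device attaining it,
--     # b2 = max end among devices other than d1 (None = no such interval)
--     prefix = [(None, None, None)]
--     b1, d1, b2 = None, None, None
--     for s, e, i in flat:
--         if b1 is None:
--             b1, d1 = e, i
--         elif i == d1:
--             if e > b1:
--                 b1 = e
--         elif e > b1:
--             b2 = b1
--             b1, d1 = e, i
--         elif b2 is None or e > b2:
--             b2 = e
--         prefix.append((b1, d1, b2))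
--     out = []
--     for i, h in enumerate(num_heard):
--         c = 0
--         if i < len(transmissions):
--             for s, e in transmissions[i]:
--                 k = _bisect_left(starts, e)
--                 pb1, pd1, pb2 = prefix[k]
--                 best = pb2 if pd1 == i else pb1
--                 if best is None or best <= s:
--                     c += 1
--         out.append(h + c)
--     return out
-- ===== Notes on version B (the rewrite author's own statement) =====
-- stated objective: faster
-- what changed: Replaces A's all-pairs overlap scan with a single sort of all transmissions by start time plus a prefix table of the top-two max end times from distinct devices, so each transmission's 'overlapped by another device?' query is answered by one binary search and a table lookup; A mutates num_heard in place while B returns a fresh list with the identical value.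
import Mathlib
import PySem

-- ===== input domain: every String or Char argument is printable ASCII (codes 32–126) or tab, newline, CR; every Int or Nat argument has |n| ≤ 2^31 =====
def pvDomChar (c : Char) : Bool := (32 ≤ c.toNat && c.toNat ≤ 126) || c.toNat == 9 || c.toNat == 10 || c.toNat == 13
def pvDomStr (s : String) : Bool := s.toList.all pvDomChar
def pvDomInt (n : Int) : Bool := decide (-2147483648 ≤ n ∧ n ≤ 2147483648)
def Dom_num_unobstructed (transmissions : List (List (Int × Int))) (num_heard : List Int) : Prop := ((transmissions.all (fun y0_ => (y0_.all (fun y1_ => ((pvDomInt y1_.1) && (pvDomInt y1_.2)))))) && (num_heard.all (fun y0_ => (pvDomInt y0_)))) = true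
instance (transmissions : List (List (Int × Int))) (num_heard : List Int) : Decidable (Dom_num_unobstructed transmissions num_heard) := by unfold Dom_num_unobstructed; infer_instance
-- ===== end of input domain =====

-- B replaces A's all-pairs overlap scan by sort + binary search + a prefix top-two-ends
-- (from distinct devices) table: O(K log K) instead of O(K^2); same return value
-- (A mutates num_heard in place, B builds a fresh list — equivalence is about the return value).

-- ===== PORT A =====
def num_unobstructed (transmissions : List (List (Int × Int))) (num_heard : List Int) : List Int :=
  (PySem.List.pyRange 0 (transmissions.length : Int) 1).foldl
    (fun nh i =>
      let dts := PySem.List.pyGetD transmissions i []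
      dts.foldl
        (fun nh t =>
          let overlap :=
            (PySem.List.pyRange 0 (transmissions.length : Int) 1).foldl
              (fun ov j =>
                if i ≠ j then
                  -- for ... in transmissions[j] with break at the first hit = List.any
                  ov || (PySem.List.pyGetD transmissions j []).any
                        (fun v => decide (v.1 < t.2) && decide (v.2 > t.1))
                else ov)
              false
          if !overlap then
            -- num_heard[i] += 1 ; the out-of-range case raises IndexError in Python
            -- (excluded by Pre_), here it is a no-op
            match PySem.List.pyGet? nh i with
            | some h => PySem.List.pySetD nh i (h + 1)
            | none => nh
          else nh)
        nh)
    num_heard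

-- ===== PORT B =====
-- B-side helpers (transcribing Source B): flatten, top-two-ends state update
def pvFlat (transmissions : List (List (Int × Int))) : List (Int × Int × Int) :=
  (PySem.List.enumerate transmissions).foldl
    (fun acc p => p.2.foldl (fun acc2 u => acc2 ++ [(u.1, u.2, p.1)]) acc) []

-- state (b1, d1, b2): max end so far, a device attaining it, max end among other devices
def pvStep (st : Option Int × Option Int × Option Int) (e i : Int) :
    Option Int × Option Int × Option Int :=
  match st with
  | (none, _, _) => (some e, some i, none)
  | (some b1, d1, b2) =>
    if d1 = some i then
      if e > b1 then (some e, d1, b2) else (some b1, d1, b2)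
    else if e > b1 then (some e, some i, some b1)
    else
      match b2 with
      | none => (some b1, d1, some e)
      | some b2v => if e > b2v then (some b1, d1, some e) else (some b1, d1, some b2v)

def num_unobstructed_alt (transmissions : List (List (Int × Int))) (num_heard : List Int) : List Int :=
  let flat := PySem.List.sorted (pvFlat transmissions) (fun u => u.1) false
  let starts := flat.map (fun u => u.1)
  -- prefix[k] = top-two state over flat[:k]
  let pfx := (flat.foldl
      (fun (p : List (Option Int × Option Int × Option Int) × (Option Int × Option Int × Option Int)) u =>
        let st := pvStep p.2 u.2.1 u.2.2
        (p.1 ++ [st], st))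
      ([(none, none, none)], (none, none, none))).1
  (PySem.List.enumerate num_heard).foldl
    (fun out q =>
      let c : Int :=
        if q.1 < (transmissions.length : Int) then
          (PySem.List.pyGetD transmissions q.1 []).foldl
            (fun c u =>
              -- hand-written _bisect_left in Source B is exactly CPython's bisect_left loop,
              -- ported as PySem.List.bisectLeft (the same lo/hi loop)
              let k := PySem.List.bisectLeft starts u.2
              -- prefix[k]: k ≤ len(starts) so the index is always in range
              let st := PySem.List.pyGetD pfx (k : Int) (none, none, none)
              let best := if st.2.1 = some q.1 then st.2.2 else st.1
              match best with
              | none => c + 1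
              | some b => if b ≤ u.1 then c + 1 else c)
            0
        else 0
      out ++ [q.2 + c]) []

-- ===== PRECONDITION & SPEC =====
-- Pre_ excludes exactly the inputs where A raises IndexError: a device index i beyond
-- len(num_heard) whose list contains a transmission not overlapped by any other device
-- reaches num_heard[i] += 1 and raises; Pre_ demands every such transmission be overlapped.
def Pre_num_unobstructed (transmissions : List (List (Int × Int))) (num_heard : List Int) : Prop :=
  ∀ i : Nat, i < transmissions.length → num_heard.length ≤ i →
    ∀ u ∈ transmissions.getD i [], ∃ j : Nat, j < transmissions.length ∧ j ≠ i ∧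
      ∃ v ∈ transmissions.getD j [], v.1 < u.2 ∧ v.2 > u.1
instance (transmissions : List (List (Int × Int))) (num_heard : List Int) : Decidable (Pre_num_unobstructed transmissions num_heard) := by unfold Pre_num_unobstructed; infer_instance

def pvWitness_num_unobstructed : (List (List (Int × Int))) × List Int :=
  ([[(0, 5)], [(3, 8)]], [0, 0])

def Spec_num_unobstructed (transmissions : List (List (Int × Int))) (num_heard : List Int) (out : List Int) : Prop := out = num_unobstructed_alt transmissions num_heard
instance (transmissions : List (List (Int × Int))) (num_heard : List Int) (out : List Int) : Decidable (Spec_num_unobstructed transmissions num_heard out) := by unfold Spec_num_unobstructed; infer_instance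

-- ===== CLAIM (what is proved, stated in full; the proofs are below) =====
def Claim_equal_num_unobstructed : Prop := ∀ (transmissions : List (List (Int × Int))) (num_heard : List Int), Dom_num_unobstructed transmissions num_heard → Pre_num_unobstructed transmissions num_heard → Spec_num_unobstructed transmissions num_heard (num_unobstructed transmissions num_heard)

-- ===== LEMMAS AND PROOFS =====

-- The common specification both ports are reduced to:
-- a transmission (s,e) of device i is obstructed iff some interval of another device overlaps it
def pvObstB (tr : List (List (Int × Int))) (i s e : Int) : Bool :=
  (pvFlat tr).any (fun u => decide (u.2.2 ≠ i) && decide (u.1 < e) && decide (u.2.1 > s))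

def pvCnt (tr : List (List (Int × Int))) (m : Nat) : Int :=
  ((tr.getD m []).countP (fun u => !pvObstB tr (m : Int) u.1 u.2) : Int)

-- ---- pvFlat characterisation ----
theorem pvFlat_eq_flatMap (tr : List (List (Int × Int))) :
    pvFlat tr = (PySem.List.enumerate tr).flatMap (fun p => p.2.map (fun u => (u.1, u.2, p.1))) := by
  have h : ∀ (l : List (Int × List (Int × Int))) (acc : List (Int × Int × Int)),
      l.foldl (fun acc p => p.2.foldl (fun acc2 u => acc2 ++ [(u.1, u.2, p.1)]) acc) acc
        = acc ++ l.flatMap (fun p => p.2.map (fun u => (u.1, u.2, p.1))) := by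
    intro l
    induction l with
    | nil => simp
    | cons x t ih =>
      intro acc
      rw [List.foldl_cons, ih,
        PySem.List.foldl_append_singleton_eq_map (fun u => (u.1, u.2, x.1)) x.2 acc]
      simp
  unfold pvFlat
  rw [h (PySem.List.enumerate tr) []]
  rfl

theorem mem_pvFlat (tr : List (List (Int × Int))) (w : Int × Int × Int) :
    w ∈ pvFlat tr ↔ ∃ (k : Nat), ∃ (hk : k < tr.length), ∃ u ∈ tr[k], w = (u.1, u.2, (k : Int)) := by
  rw [pvFlat_eq_flatMap]
  simp only [List.mem_flatMap, List.mem_map, PySem.List.mem_enumerate_iff]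
  constructor
  · rintro ⟨p, ⟨k, hk, rfl⟩, u, hu, rfl⟩
    exact ⟨k, hk, u, hu, by simp⟩
  · rintro ⟨k, hk, u, hu, rfl⟩
    exact ⟨((k : Int), tr[k]), ⟨k, hk, by simp⟩, u, hu, by simp⟩

theorem pvObstB_iff (tr : List (List (Int × Int))) (i s e : Int) :
    pvObstB tr i s e = true ↔
      ∃ (k : Nat), ∃ (hk : k < tr.length), ∃ u ∈ tr[k], (k : Int) ≠ i ∧ u.1 < e ∧ s < u.2 := by
  unfold pvObstB
  rw [List.any_eq_true]
  constructor
  · rintro ⟨w, hw, hcond⟩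
    rw [mem_pvFlat] at hw
    obtain ⟨k, hk, u, hu, rfl⟩ := hw
    simp only [Bool.and_eq_true, decide_eq_true_eq] at hcond
    exact ⟨k, hk, u, hu, hcond.1.1, hcond.1.2, hcond.2⟩
  · rintro ⟨k, hk, u, hu, h1, h2, h3⟩
    refine ⟨(u.1, u.2, (k : Int)), ?_, ?_⟩
    · rw [mem_pvFlat]; exact ⟨k, hk, u, hu, rfl⟩
    · simp [h1, h2, h3]

-- ---- A side ----
-- the overlap flag of A, named
def pvOv (tr : List (List (Int × Int))) (i : Int) (t : Int × Int) : Bool :=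
  (PySem.List.pyRange 0 (tr.length : Int) 1).foldl
    (fun ov j =>
      if i ≠ j then
        ov || (PySem.List.pyGetD tr j []).any
              (fun v => decide (v.1 < t.2) && decide (v.2 > t.1))
      else ov)
    false

-- the per-device body of A, named
def pvDev (tr : List (List (Int × Int))) (i : Int) (nh : List Int) : List Int :=
  (PySem.List.pyGetD tr i []).foldl
    (fun nh t =>
      if !pvOv tr i t then
        match PySem.List.pyGet? nh i with
        | some h => PySem.List.pySetD nh i (h + 1)
        | none => nh
      else nh)
    nh

theorem pv_A_eq (tr : List (List (Int × Int))) (nh : List Int) :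
    num_unobstructed tr nh
      = (PySem.List.pyRange 0 (tr.length : Int) 1).foldl (fun nh i => pvDev tr i nh) nh := rfl

theorem pv_foldl_or {P : Int → Prop} [DecidablePred P] (f : Int → Bool) (l : List Int) :
    ∀ (b : Bool),
      l.foldl (fun ov j => if P j then ov || f j else ov) b
        = (b || l.any (fun j => decide (P j) && f j)) := by
  induction l with
  | nil => intro b; simp
  | cons x t ih =>
    intro b
    by_cases h : P x
    · simp [List.foldl_cons, h, ih, Bool.or_assoc]
    · simp [List.foldl_cons, h, ih]

theorem pvOv_eq (tr : List (List (Int × Int))) (k : Nat) (t : Int × Int) :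
    pvOv tr (k : Int) t = pvObstB tr (k : Int) t.1 t.2 := by
  unfold pvOv
  rw [pv_foldl_or, Bool.false_or, Bool.eq_iff_iff, List.any_eq_true, pvObstB_iff]
  constructor
  · rintro ⟨j, hj, hcond⟩
    rw [PySem.List.mem_pyRange_one] at hj
    simp only [Bool.and_eq_true, decide_eq_true_eq] at hcond
    obtain ⟨hne, hany⟩ := hcond
    rw [PySem.List.pyGetD_eq_getElem tr [] hj.1 (by exact_mod_cast hj.2), List.any_eq_true] at hany
    obtain ⟨v, hv, hvc⟩ := hany
    simp only [Bool.and_eq_true, decide_eq_true_eq] at hvc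
    refine ⟨j.toNat, by omega, v, hv, by omega, hvc.1, hvc.2⟩
  · rintro ⟨j, hj, u, hu, hne, h2, h3⟩
    refine ⟨(j : Int), ?_, ?_⟩
    · rw [PySem.List.mem_pyRange_one]; omega
    · rw [Bool.and_eq_true]
      refine ⟨by simp; omega, ?_⟩
      rw [PySem.List.pyGetD_eq_getElem tr ([] : List (Int × Int)) (i := (j : Int)) (by omega) (by exact_mod_cast hj), List.any_eq_true]
      refine ⟨u, by simpa using hu, by simp [h2, h3]⟩

theorem pv_incr_getElem? (nh : List Int) (i m : Nat) :
    ((match PySem.List.pyGet? nh (i : Int) with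
      | some h => PySem.List.pySetD nh (i : Int) (h + 1)
      | none => nh) : List Int)[m]? =
      if m = i then nh[m]?.map (fun h => h + 1) else nh[m]? := by
  simp only [PySem.List.pyGet?_natCast]
  cases hg : nh[i]? with
  | none =>
    have hlen : nh.length ≤ i := by simpa using (List.getElem?_eq_none_iff.mp hg)
    by_cases hm : m = i
    · subst hm; simp [hg]
    · simp [hm]
  | some h =>
    obtain ⟨hi, hval⟩ := List.getElem?_eq_some_iff.mp hg
    simp only [PySem.List.pySetD_natCast]
    rw [List.getElem?_set]
    by_cases hm : m = i
    · subst hm; simp [hi, hval]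
    · rw [if_neg (fun hc => hm hc.symm), if_neg hm]

theorem pv_incr_fold (i : Nat) (p : (Int × Int) → Bool) :
    ∀ (dts : List (Int × Int)) (nh : List Int) (m : Nat),
      (dts.foldl
        (fun (nh : List Int) (t : Int × Int) =>
          if p t then
            match PySem.List.pyGet? nh (i : Int) with
            | some h => PySem.List.pySetD nh (i : Int) (h + 1)
            | none => nh
          else nh)
        nh)[m]? =
      if m = i then nh[m]?.map (fun h => h + (dts.countP p : Int)) else nh[m]? := by
  intro dts
  induction dts with
  | nil => intro nh m; simp
  | cons t ts ih =>
    intro nh m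
    rw [List.foldl_cons]
    by_cases hp : p t = true
    · rw [if_pos hp, ih, pv_incr_getElem?]
      by_cases hm : m = i
      · subst hm
        rw [if_pos rfl, if_pos rfl, List.countP_cons, Option.map_map]
        cases nh[m]? with
        | none => simp
        | some h =>
          simp only [Option.map_some, Function.comp]
          congr 1
          simp [hp]
          ring
      · rw [if_neg hm, if_neg hm, if_neg hm]
    · rw [if_neg hp, ih]
      by_cases hm : m = i
      · subst hm
        rw [if_pos rfl, List.countP_cons]
        simp [hp]
      · rw [if_neg hm, if_neg hm]

theorem pvDev_getElem? (tr : List (List (Int × Int))) (k : Nat) (nh : List Int) (m : Nat) :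
    (pvDev tr (k : Int) nh)[m]? =
      if m = k then nh[m]?.map (fun h => h + pvCnt tr k) else nh[m]? := by
  unfold pvDev
  rw [PySem.List.pyGetD_natCast]
  simp only [pvOv_eq]
  rw [pv_incr_fold k (fun t => !pvObstB tr (k : Int) t.1 t.2)]
  rfl

theorem pv_outer (tr : List (List (Int × Int))) :
    ∀ (N : Nat) (nh : List Int) (m : Nat),
      ((List.range N).foldl (fun (nh : List Int) (k : Nat) => pvDev tr (k : Int) nh) nh)[m]? =
        if m < N then nh[m]?.map (fun h => h + pvCnt tr m) else nh[m]? := by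
  intro N
  induction N with
  | zero => intro nh m; simp
  | succ n ih =>
    intro nh m
    rw [List.range_succ, List.foldl_append, List.foldl_cons, List.foldl_nil, pvDev_getElem?]
    by_cases hm : m = n
    · subst hm
      rw [if_pos rfl, ih, if_neg (by omega), if_pos (by omega)]
    · rw [if_neg hm, ih]
      by_cases h2 : m < n
      · rw [if_pos h2, if_pos (by omega)]
      · rw [if_neg h2, if_neg (by omega)]

theorem pv_A_char (tr : List (List (Int × Int))) (nh : List Int) (m : Nat) :
    (num_unobstructed tr nh)[m]? =
      nh[m]?.map (fun h => h + if m < tr.length then pvCnt tr m else 0) := by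
  rw [pv_A_eq, PySem.List.pyRange_one]
  rw [List.foldl_map]
  simp only [Int.sub_zero, Int.toNat_natCast, zero_add]
  rw [pv_outer]
  by_cases h : m < tr.length
  · simp [h]
  · simp [h]

-- ---- B side ----
-- named pieces of B's pipeline
def pvFlatS (tr : List (List (Int × Int))) : List (Int × Int × Int) :=
  PySem.List.sorted (pvFlat tr) (fun u => u.1) false

def pvStarts (tr : List (List (Int × Int))) : List Int :=
  (pvFlatS tr).map (fun u => u.1)

def pvPfx (tr : List (List (Int × Int))) :
    List (Option Int × Option Int × Option Int) :=
  ((pvFlatS tr).foldl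
      (fun (p : List (Option Int × Option Int × Option Int) × (Option Int × Option Int × Option Int)) u =>
        let st := pvStep p.2 u.2.1 u.2.2
        (p.1 ++ [st], st))
      ([(none, none, none)], (none, none, none))).1

def pvC (tr : List (List (Int × Int))) (q1 : Int) : Int :=
  if q1 < (tr.length : Int) then
    (PySem.List.pyGetD tr q1 []).foldl
      (fun c u =>
        let k := PySem.List.bisectLeft (pvStarts tr) u.2
        let st := PySem.List.pyGetD (pvPfx tr) (k : Int) (none, none, none)
        let best := if st.2.1 = some q1 then st.2.2 else st.1
        match best with
        | none => c + 1
        | some b => if b ≤ u.1 then c + 1 else c)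
      0
  else 0

theorem pv_B_eq (tr : List (List (Int × Int))) (nh : List Int) :
    num_unobstructed_alt tr nh
      = (PySem.List.enumerate nh).foldl (fun out q => out ++ [q.2 + pvC tr q.1]) [] := rfl

-- maximum end time of a list of tagged intervals
def pvMaxE (l : List (Int × Int × Int)) : Option Int :=
  l.foldl (fun o u => some (match o with | none => u.2.1 | some m => max m u.2.1)) none

def pvOmax (o : Option Int) (e : Int) : Option Int :=
  some (match o with | none => e | some m => max m e)

def pvFoldSt (l : List (Int × Int × Int)) : Option Int × Option Int × Option Int :=
  l.foldl (fun st u => pvStep st u.2.1 u.2.2) (none, none, none)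

-- the "max end among devices other than d" read off the top-two state
def pvExcl (st : Option Int × Option Int × Option Int) (d : Int) : Option Int :=
  if st.2.1 = some d then st.2.2 else st.1

theorem pvMaxE_append (l : List (Int × Int × Int)) (u : Int × Int × Int) :
    pvMaxE (l ++ [u]) = pvOmax (pvMaxE l) u.2.1 := by
  simp [pvMaxE, pvOmax, List.foldl_append]

theorem pvMaxE_eq_none (l : List (Int × Int × Int)) : pvMaxE l = none ↔ l = [] := by
  induction l using List.reverseRecOn with
  | nil => simp [pvMaxE]
  | append_singleton t u ih => rw [pvMaxE_append]; simp [pvOmax]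

theorem pvMaxE_spec (l : List (Int × Int × Int)) :
    ∀ m, pvMaxE l = some m → (∃ u ∈ l, u.2.1 = m) ∧ ∀ u ∈ l, u.2.1 ≤ m := by
  induction l using List.reverseRecOn with
  | nil => intro m h; simp [pvMaxE] at h
  | append_singleton t u ih =>
    intro m h
    rw [pvMaxE_append] at h
    cases ht : pvMaxE t with
    | none =>
      have : t = [] := (pvMaxE_eq_none t).mp ht
      subst this
      simp [pvOmax, ht] at h
      subst h
      simp
    | some mt =>
      rw [ht] at h
      simp only [pvOmax, Option.some.injEq] at h
      subst h
      obtain ⟨⟨w, hw, hwv⟩, hbd⟩ := ih mt ht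
      constructor
      · rcases le_total u.2.1 mt with hle | hle
        · exact ⟨w, by simp [hw], by omega⟩
        · exact ⟨u, by simp, by omega⟩
      · intro v hv
        rcases List.mem_append.mp hv with hv | hv
        · have := hbd v hv; omega
        · simp at hv; subst hv; omega

theorem pvMaxE_gt_iff (l : List (Int × Int × Int)) (s : Int) :
    (∃ u ∈ l, s < u.2.1) ↔ ∃ m, pvMaxE l = some m ∧ s < m := by
  constructor
  · rintro ⟨u, hu, hs⟩
    cases hl : pvMaxE l with
    | none => rw [pvMaxE_eq_none] at hl; subst hl; simp at hu
    | some m =>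
      have := (pvMaxE_spec l m hl).2 u hu
      exact ⟨m, rfl, by omega⟩
  · rintro ⟨m, hm, hs⟩
    obtain ⟨⟨u, hu, huv⟩, _⟩ := pvMaxE_spec l m hm
    exact ⟨u, hu, by omega⟩

theorem pvMaxE_filter_le (l : List (Int × Int × Int)) (p : Int × Int × Int → Bool)
    (m M : Int) (hm : pvMaxE (l.filter p) = some m) (hM : pvMaxE l = some M) : m ≤ M := by
  obtain ⟨⟨u, hu, huv⟩, _⟩ := pvMaxE_spec _ m hm
  have := (pvMaxE_spec l M hM).2 u (List.mem_of_mem_filter hu)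
  omega

theorem pvStep_fst (s1 s2 s3 : Option Int) (e i : Int) :
    (pvStep (s1, s2, s3) e i).1 = pvOmax s1 e := by
  cases s1 with
  | none => simp [pvStep, pvOmax]
  | some b1 =>
    simp only [pvStep, pvOmax]
    by_cases h2 : s2 = some i
    · by_cases he : e > b1 <;> simp [h2, he] <;> omega
    · by_cases he : e > b1
      · simp [h2, he]; omega
      · cases s3 with
        | none => simp [h2, he]; omega
        | some b2v => by_cases hb2 : e > b2v <;> simp [h2, he, hb2] <;> omega

theorem pvStep_excl (s1 s2 s3 : Option Int) (e i d : Int)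
    (hb : ∀ m b, pvExcl (s1, s2, s3) d = some m → s1 = some b → m ≤ b)
    (hn : s1 = none → s2 = none ∧ s3 = none) :
    pvExcl (pvStep (s1, s2, s3) e i) d =
      if i ≠ d then pvOmax (pvExcl (s1, s2, s3) d) e else pvExcl (s1, s2, s3) d := by
  cases s1 with
  | none =>
    obtain ⟨h2, h3⟩ := hn rfl
    subst h2; subst h3
    by_cases hd : i = d
    · subst hd; simp [pvStep, pvExcl]
    · simp [pvStep, pvExcl, hd, pvOmax]
  | some b1 =>
    by_cases h2 : s2 = some i
    · subst h2
      by_cases hd : i = d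
      · subst hd
        by_cases he : e > b1 <;> simp [pvStep, pvExcl, he]
      · by_cases he : e > b1 <;>
          simp [pvStep, pvExcl, pvOmax, he, hd] <;> omega
    · by_cases he : e > b1
      · by_cases hd : i = d
        · subst hd
          simp [pvStep, pvExcl, h2, he]
        · by_cases hsd : s2 = some d
          · subst hsd
            cases s3 with
            | none => simp [pvStep, pvExcl, pvOmax, h2, he, hd]
            | some m =>
              have hm : m ≤ b1 := hb m b1 (by simp [pvExcl]) rfl
              simp [pvStep, pvExcl, pvOmax, h2, he, hd]
              omega
          · simp [pvStep, pvExcl, pvOmax, h2, he, hd, hsd]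
            omega
      · by_cases hsd : s2 = some d
        · subst hsd
          have hd : ¬ i = d := fun h => h2 (by rw [h])
          cases s3 with
          | none => simp [pvStep, pvExcl, pvOmax, h2, he, hd]
          | some b2v =>
            by_cases hb2 : e > b2v <;>
              simp [pvStep, pvExcl, pvOmax, h2, he, hd, hb2] <;> omega
        · by_cases hd : i = d
          · subst hd
            cases s3 with
            | none => simp [pvStep, pvExcl, h2, he]
            | some b2v =>
              by_cases hb2 : e > b2v <;> simp [pvStep, pvExcl, h2, he, hb2]
          · cases s3 with
            | none => simp [pvStep, pvExcl, pvOmax, h2, he, hd, hsd]; omega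
            | some b2v =>
              by_cases hb2 : e > b2v <;>
                simp [pvStep, pvExcl, pvOmax, h2, he, hd, hsd, hb2] <;> omega

theorem pvFold_inv (l : List (Int × Int × Int)) :
    (pvFoldSt l).1 = pvMaxE l
    ∧ (∀ d : Int, pvExcl (pvFoldSt l) d = pvMaxE (l.filter (fun u => decide (u.2.2 ≠ d))))
    ∧ ((pvFoldSt l).1 = none → (pvFoldSt l).2.1 = none ∧ (pvFoldSt l).2.2 = none) := by
  induction l using List.reverseRecOn with
  | nil => exact ⟨rfl, fun d => by simp [pvFoldSt, pvExcl, pvMaxE], fun _ => ⟨rfl, rfl⟩⟩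
  | append_singleton t u ih =>
    have hfold : pvFoldSt (t ++ [u]) = pvStep (pvFoldSt t) u.2.1 u.2.2 := by
      simp [pvFoldSt, List.foldl_append]
    rcases hS : pvFoldSt t with ⟨s1, s2, s3⟩
    rw [hS] at hfold
    obtain ⟨ih1, ih2, ih3⟩ := ih
    rw [hS] at ih1 ih2 ih3
    dsimp only at ih1 ih2 ih3
    refine ⟨?_, ?_, ?_⟩
    · rw [hfold, pvStep_fst, ih1, pvMaxE_append]
    · intro d
      rw [hfold, pvStep_excl s1 s2 s3 u.2.1 u.2.2 d
          (fun m b hm hb1 => pvMaxE_filter_le t _ m b (by rw [← ih2 d]; exact hm) (by rw [← ih1]; exact hb1))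
          ih3]
      rw [List.filter_append, ih2 d]
      by_cases hd : u.2.2 ≠ d
      · rw [if_pos hd, show List.filter (fun u => decide (u.2.2 ≠ d)) [u] = [u] by simp [hd],
          pvMaxE_append]
      · rw [if_neg hd, show List.filter (fun u => decide (u.2.2 ≠ d)) [u] = [] by simp at hd; simp [hd],
          List.append_nil]
    · rw [hfold, pvStep_fst]
      intro hcon
      simp [pvOmax] at hcon


-- ---- the prefix table holds the fold over each prefix ----
def pvScan (st : Option Int × Option Int × Option Int) :
    List (Int × Int × Int) → List (Option Int × Option Int × Option Int)
  | [] => []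
  | u :: t => pvStep st u.2.1 u.2.2 :: pvScan (pvStep st u.2.1 u.2.2) t

theorem pvBuild_fst (l : List (Int × Int × Int)) :
    ∀ (acc : List (Option Int × Option Int × Option Int)) (st : Option Int × Option Int × Option Int),
      (l.foldl
        (fun (p : List (Option Int × Option Int × Option Int) × (Option Int × Option Int × Option Int)) u =>
          let s' := pvStep p.2 u.2.1 u.2.2
          (p.1 ++ [s'], s'))
        (acc, st)).1 = acc ++ pvScan st l := by
  induction l with
  | nil => intro acc st; simp [pvScan]
  | cons u t ih =>
    intro acc st
    rw [List.foldl_cons]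
    rw [ih (acc ++ [pvStep st u.2.1 u.2.2]) (pvStep st u.2.1 u.2.2)]
    simp [pvScan]

theorem pvScan_getElem? (l : List (Int × Int × Int)) :
    ∀ (st : Option Int × Option Int × Option Int) (j : Nat), j < l.length →
      (pvScan st l)[j]? = some ((l.take (j + 1)).foldl (fun st u => pvStep st u.2.1 u.2.2) st) := by
  induction l with
  | nil => intro st j h; simp at h
  | cons u t ih =>
    intro st j hj
    cases j with
    | zero => simp [pvScan]
    | succ j =>
      rw [show pvScan st (u :: t) = pvStep st u.2.1 u.2.2 :: pvScan (pvStep st u.2.1 u.2.2) t from rfl]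
      rw [List.getElem?_cons_succ, ih (pvStep st u.2.1 u.2.2) j (by simpa using hj)]
      simp

theorem pvPfx_get (tr : List (List (Int × Int))) (k : Nat) (hk : k ≤ (pvFlatS tr).length) :
    PySem.List.pyGetD (pvPfx tr) (k : Int) (none, none, none)
      = pvFoldSt ((pvFlatS tr).take k) := by
  have hpfx : pvPfx tr = [(none, none, none)] ++ pvScan (none, none, none) (pvFlatS tr) := by
    unfold pvPfx
    exact pvBuild_fst (pvFlatS tr) [(none, none, none)] (none, none, none)
  rw [PySem.List.pyGetD_natCast, hpfx]
  cases k with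
  | zero => simp [pvFoldSt]
  | succ j =>
    have hj : j < (pvFlatS tr).length := by omega
    rw [List.getD_eq_getElem?_getD, List.getElem?_append_right (by simp)]
    simp only [List.length_cons, List.length_nil]
    rw [show j + 1 - 1 = j from rfl, pvScan_getElem? (pvFlatS tr) (none, none, none) j hj]
    rfl

-- ---- on a list sorted by start time, "start < e" is a prefix ----
theorem pv_take_eq_filter (e : Int) (l : List (Int × Int × Int)) (k : Nat)
    (hk : k ≤ l.length)
    (hlt : ∀ j (hj : j < l.length), j < k → l[j].1 < e)
    (hge : ∀ j (hj : j < l.length), k ≤ j → e ≤ l[j].1) :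
    l.filter (fun w => decide (w.1 < e)) = l.take k := by
  conv_lhs => rw [← List.take_append_drop k l]
  rw [List.filter_append]
  have h1 : (l.take k).filter (fun w => decide (w.1 < e)) = l.take k := by
    rw [List.filter_eq_self]
    intro a ha
    obtain ⟨j, hj, hja⟩ := List.mem_iff_getElem.mp ha
    have hjlen : j < min k l.length := by simpa using hj
    have hget : (l.take k)[j] = l[j]'(by omega) := List.getElem_take
    rw [hget] at hja
    simp only [decide_eq_true_eq]
    rw [← hja]
    exact hlt j (by omega) (by omega)
  have h2 : (l.drop k).filter (fun w => decide (w.1 < e)) = [] := by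
    rw [List.filter_eq_nil_iff]
    intro a ha
    obtain ⟨j, hj, hja⟩ := List.mem_iff_getElem.mp ha
    have hjlen : j < l.length - k := by simpa using hj
    have hget : (l.drop k)[j] = l[k + j]'(by omega) := List.getElem_drop
    rw [hget] at hja
    simp only [decide_eq_true_eq]
    rw [← hja]
    have := hge (k + j) (by omega) (by omega)
    omega
  rw [h1, h2, List.append_nil]

-- ---- the per-transmission test of B, named, and shown equal to the obstruction test ----
def pvOk (tr : List (List (Int × Int))) (q1 : Int) (u : Int × Int) : Bool :=
  let k := PySem.List.bisectLeft (pvStarts tr) u.2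
  let st := PySem.List.pyGetD (pvPfx tr) (k : Int) (none, none, none)
  let best := if st.2.1 = some q1 then st.2.2 else st.1
  match best with
  | none => true
  | some b => decide (b ≤ u.1)

theorem pv_match_if (c : Int) (u1 : Int) (best : Option Int) :
    (match best with | none => c + 1 | some b => if b ≤ u1 then c + 1 else c)
      = if (match best with | none => true | some b => decide (b ≤ u1)) then c + 1 else c := by
  cases best with
  | none => rfl
  | some b => by_cases h : b ≤ u1 <;> simp [h]

theorem pv_query (tr : List (List (Int × Int))) (i : Int) (u : Int × Int) :
    pvOk tr i u = !pvObstB tr i u.1 u.2 := by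
  have hpair : (pvFlatS tr).Pairwise (fun a b => a.1 ≤ b.1) :=
    PySem.List.sorted_pairwise (pvFlat tr) (fun u => u.1)
  have hspair : (pvStarts tr).Pairwise (· ≤ ·) := by
    unfold pvStarts
    exact List.pairwise_map.mpr hpair
  obtain ⟨hk, hlt, hge⟩ := PySem.List.bisectLeft_spec (pvStarts tr) u.2 hspair
  have hlen : (pvStarts tr).length = (pvFlatS tr).length := by simp [pvStarts]
  have htake : (pvFlatS tr).filter (fun w => decide (w.1 < u.2))
      = (pvFlatS tr).take (PySem.List.bisectLeft (pvStarts tr) u.2) := by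
    apply pv_take_eq_filter u.2 (pvFlatS tr) _ (by omega)
    · intro j hj hjk
      have h := hlt j (by omega) hjk
      simpa [pvStarts] using h
    · intro j hj hjk
      have h := hge j (by omega) hjk
      simpa [pvStarts] using h
  unfold pvOk
  dsimp only
  rw [pvPfx_get tr (PySem.List.bisectLeft (pvStarts tr) u.2) (by omega)]
  have hexcl : (if (pvFoldSt ((pvFlatS tr).take (PySem.List.bisectLeft (pvStarts tr) u.2))).2.1 = some i
        then (pvFoldSt ((pvFlatS tr).take (PySem.List.bisectLeft (pvStarts tr) u.2))).2.2
        else (pvFoldSt ((pvFlatS tr).take (PySem.List.bisectLeft (pvStarts tr) u.2))).1)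
      = pvExcl (pvFoldSt ((pvFlatS tr).take (PySem.List.bisectLeft (pvStarts tr) u.2))) i := rfl
  rw [hexcl, (pvFold_inv ((pvFlatS tr).take (PySem.List.bisectLeft (pvStarts tr) u.2))).2.1 i]
  set L := (((pvFlatS tr).take (PySem.List.bisectLeft (pvStarts tr) u.2)).filter
      (fun u => decide (u.2.2 ≠ i))) with hL
  have hmem : ∀ w, w ∈ L ↔ (w ∈ pvFlat tr ∧ w.2.2 ≠ i ∧ w.1 < u.2) := by
    intro w
    rw [hL, List.mem_filter, ← htake, List.mem_filter]
    unfold pvFlatS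
    rw [PySem.List.mem_sorted]
    constructor
    · rintro ⟨⟨hw, hlt'⟩, hne⟩
      exact ⟨hw, by simpa using hne, by simpa using hlt'⟩
    · rintro ⟨hw, hne, hlt'⟩
      exact ⟨⟨hw, by simpa using hlt'⟩, by simpa using hne⟩
  have hobst : pvObstB tr i u.1 u.2 = true ↔ ∃ w ∈ L, u.1 < w.2.1 := by
    unfold pvObstB
    rw [List.any_eq_true]
    constructor
    · rintro ⟨w, hw, hc⟩
      simp only [Bool.and_eq_true, decide_eq_true_eq] at hc
      exact ⟨w, (hmem w).mpr ⟨hw, hc.1.1, hc.1.2⟩, hc.2⟩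
    · rintro ⟨w, hw, hc⟩
      obtain ⟨hw', hne, hlt'⟩ := (hmem w).mp hw
      exact ⟨w, hw', by simp [hne, hlt', hc]⟩
  cases hM : pvMaxE L with
  | none =>
    have : ¬ (pvObstB tr i u.1 u.2 = true) := by
      rw [hobst]
      rintro ⟨w, hw, hc⟩
      obtain ⟨m, hm, _⟩ := (pvMaxE_gt_iff L u.1).mp ⟨w, hw, hc⟩
      rw [hM] at hm
      simp at hm
    simp [Bool.not_eq_true] at this
    simp [this]
  | some b =>
    by_cases hbs : b ≤ u.1
    · have : ¬ (pvObstB tr i u.1 u.2 = true) := by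
        rw [hobst]
        intro hex
        obtain ⟨m, hm, hgt⟩ := (pvMaxE_gt_iff L u.1).mp hex
        rw [hM] at hm
        have := Option.some.inj hm
        omega
      simp only [Bool.not_eq_true] at this
      simp [this, hbs]
    · have : pvObstB tr i u.1 u.2 = true := by
        rw [hobst]
        exact (pvMaxE_gt_iff L u.1).mpr ⟨b, hM, by omega⟩
      simp [this, hbs]

theorem pvC_eq (tr : List (List (Int × Int))) (m : Nat) :
    pvC tr (m : Int) = if m < tr.length then pvCnt tr m else 0 := by
  unfold pvC
  by_cases hm : m < tr.length
  · rw [if_pos (by exact_mod_cast hm), if_pos hm, PySem.List.pyGetD_natCast]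
    dsimp only
    simp only [pv_match_if]
    show List.foldl (fun (c : Int) (u : Int × Int) => if pvOk tr (m : Int) u then c + 1 else c)
        0 (tr.getD m []) = pvCnt tr m
    rw [PySem.List.foldl_count_if (pvOk tr (m : Int)) (tr.getD m []) 0, zero_add]
    unfold pvCnt
    congr 1
    apply List.countP_congr
    intro u _
    rw [pv_query]
  · rw [if_neg (by exact_mod_cast hm), if_neg hm]

theorem pv_B_char (tr : List (List (Int × Int))) (nh : List Int) (m : Nat) :
    (num_unobstructed_alt tr nh)[m]? =
      nh[m]?.map (fun h => h + if m < tr.length then pvCnt tr m else 0) := by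
  rw [pv_B_eq,
    PySem.List.foldl_append_singleton_eq_map (fun q => q.2 + pvC tr q.1) (PySem.List.enumerate nh) [],
    List.nil_append, List.getElem?_map, PySem.List.getElem?_enumerate]
  cases nh[m]? with
  | none => simp
  | some h =>
    simp only [Option.map_some]
    congr 1
    show h + pvC tr ((0 : Int) + (m : Int)) = h + _
    rw [zero_add, pvC_eq]

-- ===== VERDICT (by name: the statement is the Claim_ definition above) =====

theorem num_unobstructed_spec : Claim_equal_num_unobstructed := by
  intro tr nh _ _
  unfold Spec_num_unobstructed
  apply List.ext_getElem?
  intro m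
  rw [pv_A_char, pv_B_char]
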